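-- pv_equiv track=rewrite | github.com/rekhi8-lab/astrology-ai | bot/telegram_handler.py | has_topic_overlap
-- ===== SOURCE A (Python) =====
-- def has_topic_overlap(query: str, frequent_topics: list[str]) -> bool:
--     lowered = query.lower()
--     if any(topic in lowered for topic in frequent_topics):
--         return True
--
--     query_terms = {term for term in lowered.split() if len(term) > 2}
--     for topic in frequent_topics:
--         topic_terms = {term for term in topic.lower().split() if len(term) > 2}
--         if query_terms & topic_terms:
--             return True
--     return False
-- ===== SOURCE B (Python) =====
-- def has_topic_overlap(query: str, frequent_topics: list[str]) -> bool:
--     lowered = query.lower()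
--     if any(topic in lowered for topic in frequent_topics):
--         return True
--     qs = sorted({w for w in lowered.split() if len(w) > 2})
--     ts = sorted({w for topic in frequent_topics
--                    for w in topic.lower().split() if len(w) > 2})
--     i = j = 0
--     while i < len(qs) and j < len(ts):
--         if qs[i] == ts[j]:
--             return True
--         if qs[i] < ts[j]:
--             i += 1
--         else:
--             j += 1
--     return False
-- ===== Notes on version B (the rewrite author's own statement) =====
-- stated objective: alternative
-- what changed: Replaces A's per-topic hash-set intersections with sorting the deduplicated query terms and all aggregated topic terms, then a two-pointer sorted-merge scan to detect a common term.
import Mathlib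
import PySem

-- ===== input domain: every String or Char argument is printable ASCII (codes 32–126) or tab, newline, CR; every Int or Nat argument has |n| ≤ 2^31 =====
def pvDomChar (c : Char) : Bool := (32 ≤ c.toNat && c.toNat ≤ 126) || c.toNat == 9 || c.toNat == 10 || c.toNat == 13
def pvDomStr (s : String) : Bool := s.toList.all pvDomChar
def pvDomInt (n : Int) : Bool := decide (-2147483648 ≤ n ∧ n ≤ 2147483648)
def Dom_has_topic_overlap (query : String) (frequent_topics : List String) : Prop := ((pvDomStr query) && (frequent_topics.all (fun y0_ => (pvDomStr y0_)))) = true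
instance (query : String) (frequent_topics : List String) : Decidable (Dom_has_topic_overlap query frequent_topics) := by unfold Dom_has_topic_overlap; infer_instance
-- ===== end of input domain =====

-- B detects a shared long term by sorting both deduplicated term sets and running a two-pointer merge scan, instead of A's per-topic hash-set intersections; same results.

-- ===== PORT A =====
def has_topic_overlap (query : String) (frequent_topics : List String) : Bool :=
  let lowered := PySem.Str.lower query
  if frequent_topics.any (fun topic => PySem.Str.isIn topic lowered) then true
  else
    let query_terms : PySem.Set String :=
      PySem.Set.ofList ((PySem.Str.split₀ lowered).filter (fun term => decide (2 < PySem.Str.len term)))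
    frequent_topics.any (fun topic =>
      !(PySem.Set.inter query_terms
          (PySem.Set.ofList ((PySem.Str.split₀ (PySem.Str.lower topic)).filter
            (fun term => decide (2 < PySem.Str.len term))))).isEmpty)

-- ===== PORT B =====
-- the while-loop of Source B: two index pointers over the sorted lists ≅ recursion on the two suffixes
def pvMergeHit : List String → List String → Bool
  | a :: as, b :: bs =>
    if a = b then true
    else if a < b then pvMergeHit as (b :: bs)
    else pvMergeHit (a :: as) bs
  | _, _ => false
  termination_by xs ys => xs.length + ys.length
  decreasing_by all_goals simp

def has_topic_overlap_alt (query : String) (frequent_topics : List String) : Bool :=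
  let lowered := PySem.Str.lower query
  if frequent_topics.any (fun topic => PySem.Str.isIn topic lowered) then true
  else
    let qs := PySem.List.sorted
      (PySem.Set.ofList ((PySem.Str.split₀ lowered).filter (fun w => decide (2 < PySem.Str.len w))))
      (fun x => x) false
    let ts := PySem.List.sorted
      (PySem.Set.ofList (frequent_topics.flatMap (fun topic =>
        (PySem.Str.split₀ (PySem.Str.lower topic)).filter (fun w => decide (2 < PySem.Str.len w)))))
      (fun x => x) false
    pvMergeHit qs ts

-- ===== PRECONDITION & SPEC =====
def Spec_has_topic_overlap (query : String) (frequent_topics : List String) (out : Bool) : Prop := out = has_topic_overlap_alt query frequent_topics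
instance (query : String) (frequent_topics : List String) (out : Bool) : Decidable (Spec_has_topic_overlap query frequent_topics out) := by unfold Spec_has_topic_overlap; infer_instance

-- ===== CLAIM (what is proved, stated in full; the proofs are below) =====
def Claim_equal_has_topic_overlap : Prop := ∀ (query : String) (frequent_topics : List String), Dom_has_topic_overlap query frequent_topics → Spec_has_topic_overlap query frequent_topics (has_topic_overlap query frequent_topics)

-- ===== LEMMAS AND PROOFS =====

-- merge scan on strictly sorted lists finds exactly a common element
lemma pvMergeHit_iff (xs ys : List String) :
    xs.Pairwise (· < ·) → ys.Pairwise (· < ·) →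
    (pvMergeHit xs ys = true ↔ ∃ x, x ∈ xs ∧ x ∈ ys) := by
  fun_induction pvMergeHit xs ys with
  | case1 as b bs =>
    intro _ _
    exact iff_of_true rfl ⟨b, by simp, by simp⟩
  | case2 a as b bs hne hlt ih =>
    intro hx hy
    rw [ih (hx.sublist (List.sublist_cons_self a as)) hy]
    constructor
    · rintro ⟨x, hxs, hys⟩; exact ⟨x, List.mem_cons_of_mem a hxs, hys⟩
    · rintro ⟨x, hxs, hys⟩
      refine ⟨x, ?_, hys⟩
      rcases List.mem_cons.mp hxs with rfl | h
      · exfalso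
        rcases List.mem_cons.mp hys with rfl | h'
        · exact hne rfl
        · have := (List.pairwise_cons.mp hy).1 x h'
          exact absurd (lt_trans hlt this) (lt_irrefl x)
      · exact h
  | case3 a as b bs hne hge ih =>
    intro hx hy
    have hba : b < a := lt_of_le_of_ne (not_lt.mp hge) (fun h => hne h.symm)
    rw [ih hx (hy.sublist (List.sublist_cons_self b bs))]
    constructor
    · rintro ⟨x, hxs, hys⟩; exact ⟨x, hxs, List.mem_cons_of_mem b hys⟩
    · rintro ⟨x, hxs, hys⟩
      refine ⟨x, hxs, ?_⟩
      rcases List.mem_cons.mp hys with rfl | h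
      · exfalso
        rcases List.mem_cons.mp hxs with rfl | h'
        · exact hne rfl
        · have := (List.pairwise_cons.mp hx).1 x h'
          exact absurd (lt_trans hba this) (lt_irrefl x)
      · exact h
  | case4 xs ys hno =>
    intro _ _
    simp only [Bool.false_eq_true, false_iff]
    rintro ⟨x, hxs, hys⟩
    cases xs with
    | nil => exact absurd hxs (List.not_mem_nil)
    | cons a as =>
      cases ys with
      | nil => exact absurd hys (List.not_mem_nil)
      | cons b bs => exact hno a as b bs rfl rfl

-- sorting a deduplicated list gives a strictly sorted list
lemma sorted_set_pairwise_lt (l : List String) :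
    (PySem.List.sorted (PySem.Set.ofList l) (fun x => x) false).Pairwise (· < ·) := by
  have hperm := PySem.List.sorted_perm (PySem.Set.ofList l) (fun x : String => x) false
  have hnd : (PySem.List.sorted (PySem.Set.ofList l) (fun x => x) false).Nodup :=
    (hperm.nodup_iff).mpr (PySem.Set.nodup_ofList l)
  have hle : (PySem.List.sorted (PySem.Set.ofList l) (fun x => x) false).Pairwise (· ≤ ·) := by
    rw [List.pairwise_iff_getElem]
    intro i j hi hj hij
    exact PySem.List.sorted_id_getElem_mono (PySem.Set.ofList l) (le_of_lt hij) hj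
  exact (List.pairwise_and_iff.mpr ⟨hle, hnd⟩).imp (fun h => lt_of_le_of_ne h.1 h.2)

lemma mem_sorted_set (l : List String) (x : String) :
    x ∈ PySem.List.sorted (PySem.Set.ofList l) (fun x => x) false ↔ x ∈ l := by
  rw [(PySem.List.sorted_perm (PySem.Set.ofList l) (fun x : String => x) false).mem_iff]
  exact PySem.Set.mem_ofList l x

-- ===== VERDICT (by name: the statement is the Claim_ definition above) =====
theorem has_topic_overlap_spec : Claim_equal_has_topic_overlap := by
  intro query frequent_topics _
  show has_topic_overlap query frequent_topics = has_topic_overlap_alt query frequent_topics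
  simp only [has_topic_overlap, has_topic_overlap_alt]
  cases h : frequent_topics.any (fun topic => PySem.Str.isIn topic (PySem.Str.lower query)) with
  | true => simp
  | false =>
    simp only [Bool.false_eq_true, if_false]
    rw [Bool.eq_iff_iff]
    rw [pvMergeHit_iff _ _ (sorted_set_pairwise_lt _) (sorted_set_pairwise_lt _)]
    simp only [List.any_eq_true, Bool.not_eq_true', List.isEmpty_eq_false_iff_exists_mem]
    constructor
    · rintro ⟨topic, htop, x, hx⟩
      rcases (PySem.Set.mem_inter _ _ x).mp hx with ⟨hq, ht⟩
      refine ⟨x, ?_, ?_⟩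
      · rw [mem_sorted_set]; exact (PySem.Set.mem_ofList _ x).mp hq
      · rw [mem_sorted_set, List.mem_flatMap]
        exact ⟨topic, htop, (PySem.Set.mem_ofList _ x).mp ht⟩
    · rintro ⟨x, hq, ht⟩
      rw [mem_sorted_set] at hq
      rw [mem_sorted_set, List.mem_flatMap] at ht
      rcases ht with ⟨topic, htop, hx⟩
      exact ⟨topic, htop, x, (PySem.Set.mem_inter _ _ x).mpr
        ⟨(PySem.Set.mem_ofList _ x).mpr hq, (PySem.Set.mem_ofList _ x).mpr hx⟩⟩
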